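-- pv_equiv track=rewrite | github.com/david-hoze/scientific-writing | circuit-presheaf/scripts/n5_scan.py | sample_threshold
-- ===== SOURCE A (Python) =====
-- def sample_threshold(n=5):
--     """Threshold functions: f = 1 iff popcount(x) >= k."""
--     results = []
--     for k in range(n + 2):
--         tt = 0
--         for i in range(1 << n):
--             if bin(i).count('1') >= k:
--                 tt |= (1 << i)
--         results.append(('THR_' + str(k), tt))
--     return results
-- ===== SOURCE B (Python) =====
-- def sample_threshold(n=5):
--     """Threshold functions: f = 1 iff popcount(x) >= k.
--
--     Pascal-style doubling DP: buckets[p] is the truth-table integer of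
--     'popcount(x) == p' over the inputs built so far; doubling the width
--     w -> w+1 combines each bucket with the previous one shifted into the
--     upper half.  tt_k is then the suffix sum of the buckets, accumulated
--     back-to-front.  All supports are disjoint, so '+' is exact.
--     No popcount is ever computed.
--     """
--     buckets = [1]
--     for w in range(n):
--         hi = 2 ** (2 ** w)  # input i of the low half becomes i + 2^w, i.e. bit position shifts by 2^w
--         buckets = [buckets[0]] \
--             + [buckets[p] + buckets[p - 1] * hi for p in range(1, len(buckets))] \
--             + [buckets[-1] * hi]
--     results = []
--     acc = 0
--     for k in range(n + 1, -1, -1):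
--         if k <= n:
--             acc += buckets[k]
--         results.insert(0, ('THR_' + str(k), acc))
--     return results
-- ===== Notes on version B (the rewrite author's own statement) =====
-- stated objective: alternative
-- what changed: Replaces the per-threshold rescan of all 2^n inputs (with a popcount per visit) by a Pascal-style doubling DP that builds the 'popcount == p' bucket masks by width doubling with shifted additions and then takes suffix sums, computing no popcounts at all.
-- outside the precondition, e.g. on sample_threshold(-1): A raises ValueError, B returns [('THR_0', 0)]
import Mathlib
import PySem

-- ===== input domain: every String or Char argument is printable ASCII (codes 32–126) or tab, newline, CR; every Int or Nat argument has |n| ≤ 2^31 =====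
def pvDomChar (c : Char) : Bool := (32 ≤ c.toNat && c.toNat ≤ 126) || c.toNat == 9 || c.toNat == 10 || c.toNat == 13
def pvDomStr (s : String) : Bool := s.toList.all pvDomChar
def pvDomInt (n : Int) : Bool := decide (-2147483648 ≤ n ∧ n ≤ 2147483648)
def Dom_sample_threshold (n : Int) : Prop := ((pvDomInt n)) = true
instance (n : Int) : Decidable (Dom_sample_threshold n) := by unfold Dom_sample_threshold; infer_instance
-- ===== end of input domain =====

-- B replaces A's per-threshold rescan of all 2^n inputs (one popcount per visit) by a
-- Pascal-style width-doubling DP over 'popcount == p' bucket masks followed by suffix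
-- sums (objective: an alternative algorithm; no speed claim is made).

-- ===== PORT A =====
-- bin(i).count('1') counts the 1-digits of the binary expansion, i.e. the popcount of
-- i ≥ 0: ported as the prelude's popcount primitive PySem.Int.bitCount (= i.bit_count()).
-- '1 << n' is (1 : Int) <<< n.toNat, exact whenever it is evaluated with n ≥ 0; at
-- n = -1 Python raises ValueError (excluded by Pre_), and for any more negative n the
-- outer range is empty so the shift is never evaluated.
def sample_threshold (n : Int) : List (String × Int) :=
  (PySem.List.pyRange 0 (n + 2) 1).foldl (fun results k =>
    results ++ [("THR_" ++ PySem.Int.toStr k,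
      (PySem.List.pyRange 0 ((1 : Int) <<< n.toNat) 1).foldl (fun tt i =>
        if k ≤ ((PySem.Int.bitCount i : Nat) : Int) then
          PySem.Int.bor tt ((1 : Int) <<< i.toNat)
        else tt) 0)]) []

-- ===== PORT B =====
-- literal transliteration of Source B: buckets DP by width doubling ('2 ** (2 ** w)' with
-- w ≥ 0 from range(n) is 2 ^ (2 ^ w.toNat)), then the back-to-front suffix loop;
-- 'results.insert(0, x)' is consing x onto the accumulator.
-- one width-doubling round of the buckets DP ('hi = 2 ** (2 ** w)' with w ≥ 0)
def pvStepB (b : List Int) (w : Int) : List Int :=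
  let hi : Int := 2 ^ 2 ^ w.toNat
  [PySem.List.pyGetD b 0 0] ++
    (PySem.List.pyRange 1 (PySem.List.len b) 1).map
      (fun p => PySem.List.pyGetD b p 0 + PySem.List.pyGetD b (p - 1) 0 * hi) ++
    [PySem.List.pyGetD b (-1) 0 * hi]

-- one iteration of the back-to-front suffix loop; 'results.insert(0, x)' is consing
def pvSufStepB (buckets : List Int) (n : Int) (st : Int × List (String × Int)) (k : Int) :
    Int × List (String × Int) :=
  let acc := if k ≤ n then st.1 + PySem.List.pyGetD buckets k 0 else st.1
  (acc, ("THR_" ++ PySem.Int.toStr k, acc) :: st.2)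

def sample_threshold_alt (n : Int) : List (String × Int) :=
  let buckets := (PySem.List.pyRange 0 n 1).foldl pvStepB [1]
  ((PySem.List.pyRange (n + 1) (-1) (-1)).foldl (pvSufStepB buckets n) (0, [])).2

-- ===== PRECONDITION & SPEC =====
-- A raises ValueError (negative shift count in '1 << n') exactly at n = -1; for any
-- more negative n the outer range is empty and A returns normally. Pre_ excludes n = -1 only.
def Pre_sample_threshold (n : Int) : Prop := n ≠ -1
instance (n : Int) : Decidable (Pre_sample_threshold n) := by unfold Pre_sample_threshold; infer_instance
def pvWitness_sample_threshold : Int := (3)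

def Spec_sample_threshold (n : Int) (out : List (String × Int)) : Prop := out = sample_threshold_alt n
instance (n : Int) (out : List (String × Int)) : Decidable (Spec_sample_threshold n out) := by unfold Spec_sample_threshold; infer_instance

-- ===== CLAIM (what is proved, stated in full; the proofs are below) =====
def Claim_equal_sample_threshold : Prop := ∀ (n : Int), Dom_sample_threshold n → Pre_sample_threshold n → Spec_sample_threshold n (sample_threshold n)

-- ===== LEMMAS AND PROOFS =====

-- popcount of a natural number, as both Pythons' tests see it
def pvBC (m : Nat) : Nat := PySem.Int.bitCount (m : Int)

theorem pvBC_step (m : Nat) : pvBC m = m % 2 + pvBC (m / 2) := by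
  rcases Nat.eq_zero_or_pos m with h | h
  · subst h; rfl
  · exact PySem.Int.bitCount_natCast h

theorem pvBC_le (w : Nat) : ∀ m : Nat, m < 2 ^ w → pvBC m ≤ w := by
  induction w with
  | zero => intro m hm; interval_cases m; decide
  | succ w ih =>
    intro m hm
    rw [pvBC_step]
    have := ih (m / 2) (by omega)
    have : m % 2 ≤ 1 := by omega
    omega

theorem pvBC_add_pow (w : Nat) : ∀ m : Nat, m < 2 ^ w → pvBC (2 ^ w + m) = pvBC m + 1 := by
  induction w with
  | zero => intro m hm; interval_cases m; decide
  | succ w ih =>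
    intro m hm
    rw [pvBC_step, pvBC_step m]
    have h1 : (2 ^ (w + 1) + m) / 2 = 2 ^ w + m / 2 := by
      have : 2 ^ (w + 1) = 2 * 2 ^ w := by ring
      omega
    have h2 : (2 ^ (w + 1) + m) % 2 = m % 2 := by
      have : 2 ^ (w + 1) = 2 * 2 ^ w := by ring
      omega
    rw [h1, h2, ih (m / 2) (by omega)]
    omega

-- the partial truth-table value A's inner loop accumulates
def pvTT (N k : Nat) : Nat := ∑ i ∈ Finset.range N, if k ≤ pvBC i then 2 ^ i else 0

-- B's bucket masks: truth table of 'popcount == p' over w-bit inputs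
def pvBK (w p : Nat) : Nat := ∑ i ∈ Finset.range (2 ^ w), if pvBC i = p then 2 ^ i else 0

-- B's suffix sums
def pvSUF (w k : Nat) : Nat := ∑ p ∈ Finset.Icc k w, pvBK w p

theorem pvTT_lt (k : Nat) : ∀ N : Nat, pvTT N k < 2 ^ N := by
  intro N
  induction N with
  | zero => simp [pvTT]
  | succ N ih =>
    rw [pvTT, Finset.sum_range_succ, ← pvTT]
    have : (if k ≤ pvBC N then 2 ^ N else 0) ≤ 2 ^ N := by split <;> omega
    have : 2 ^ (N + 1) = 2 ^ N + 2 ^ N := by ring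
    omega

theorem pv_lor_two_pow (a i : Nat) (h : a < 2 ^ i) : a ||| 2 ^ i = a + 2 ^ i := by
  rw [Nat.lor_comm, Nat.add_comm]
  apply Nat.eq_of_testBit_eq
  intro j
  rw [Nat.testBit_lor]
  rcases lt_trichotomy j i with hj | rfl | hj
  · rw [Nat.testBit_two_pow_add_gt hj, Nat.testBit_two_pow_of_ne (by omega), Bool.false_or]
  · rw [Nat.testBit_two_pow_add_eq, Nat.testBit_two_pow, Nat.testBit_lt_two_pow h]
    simp
  · have hb : 2 ^ i + a < 2 ^ j := by
      have h1 : 2 ^ (i + 1) ≤ 2 ^ j := Nat.pow_le_pow_right (by omega) (by omega)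
      have h2 : 2 ^ (i + 1) = 2 ^ i + 2 ^ i := by ring
      omega
    rw [Nat.testBit_two_pow_of_ne (by omega), Bool.false_or,
      Nat.testBit_lt_two_pow hb, Nat.testBit_lt_two_pow (show a < 2 ^ j by omega)]

-- A's inner loop, after the range is exposed as List.range, computes pvTT
theorem pv_innerA (k : Int) : ∀ N : Nat,
    (List.range N).foldl (fun (tt : Int) (j : Nat) =>
      if k ≤ ((PySem.Int.bitCount ((j : Nat) : Int) : Nat) : Int) then
        PySem.Int.bor tt ((1 : Int) <<< j)
      else tt) 0 = ((pvTT N k.toNat : Nat) : Int) := by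
  intro N
  induction N with
  | zero => simp [pvTT]
  | succ N ih =>
    rw [List.range_succ, List.foldl_append, ih, List.foldl_cons, List.foldl_nil,
      show pvTT (N + 1) k.toNat = pvTT N k.toNat + (if k.toNat ≤ pvBC N then 2 ^ N else 0) from by
        rw [pvTT, Finset.sum_range_succ]; rfl]
    by_cases hc : k.toNat ≤ pvBC N
    · rw [if_pos (show k ≤ ((PySem.Int.bitCount ((N : Nat) : Int) : Nat) : Int) from Int.toNat_le.mp hc),
        if_pos hc, Int.shiftLeft_eq, one_mul,
        show ((2 : Int) ^ N) = ((2 ^ N : Nat) : Int) by push_cast; ring,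
        PySem.Int.bor_natCast, pv_lor_two_pow _ _ (pvTT_lt k.toNat N)]
    · rw [if_neg (show ¬ k ≤ ((PySem.Int.bitCount ((N : Nat) : Int) : Nat) : Int) from
        fun h => hc (Int.toNat_le.mpr h)), if_neg hc, Nat.add_zero]

theorem pvBK_zero_of_gt (w p : Nat) (h : w < p) : pvBK w p = 0 := by
  unfold pvBK
  apply Finset.sum_eq_zero
  intro i hi
  have := pvBC_le w i (Finset.mem_range.mp hi)
  rw [if_neg (by omega)]

theorem pvBK_succ (w p : Nat) :
    pvBK (w + 1) p = pvBK w p + (if p = 0 then 0 else pvBK w (p - 1)) * 2 ^ 2 ^ w := by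
  unfold pvBK
  rw [show 2 ^ (w + 1) = 2 ^ w + 2 ^ w by ring, Finset.sum_range_add]
  congr 1
  rw [Finset.sum_congr rfl (fun i hi => by
    rw [pvBC_add_pow w i (Finset.mem_range.mp hi), pow_add])]
  cases p with
  | zero => simp
  | succ q =>
    simp only [Nat.succ_ne_zero, if_false, Nat.add_sub_cancel, Finset.sum_mul]
    apply Finset.sum_congr rfl
    intro i _
    by_cases hq : pvBC i = q
    · rw [if_pos (by omega), if_pos hq, mul_comm]
    · rw [if_neg (by omega), if_neg hq, zero_mul]

theorem pvTT_eq (w k : Nat) : pvTT (2 ^ w) k = pvSUF w k := by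
  unfold pvTT pvSUF pvBK
  rw [Finset.sum_comm]
  apply Finset.sum_congr rfl
  intro i hi
  have hble := pvBC_le w i (Finset.mem_range.mp hi)
  rw [Finset.sum_ite_eq (Finset.Icc k w) (pvBC i) (fun _ => 2 ^ i)]
  exact if_congr (by simp [Finset.mem_Icc]; omega) rfl rfl

theorem pvSUF_step (w j : Nat) (h : j ≤ w) : pvSUF w j = pvBK w j + pvSUF w (j + 1) := by
  unfold pvSUF
  rw [show Finset.Icc j w = insert j (Finset.Icc (j + 1) w) by ext x; simp [Finset.mem_Icc]; omega,
    Finset.sum_insert (by simp)]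

theorem pvSUF_top (w : Nat) : pvSUF w (w + 1) = 0 := by
  unfold pvSUF
  rw [Finset.Icc_eq_empty (by omega), Finset.sum_empty]


def pvEntry (m k : Nat) : String × Int := ("THR_" ++ PySem.Int.toStr (k : Int), ((pvSUF m k : Nat) : Int))

-- indexing the bucket list
theorem pv_getD_bl (m p : Nat) (hp : p ≤ m) :
    PySem.List.pyGetD ((List.range (m + 1)).map (fun q => ((pvBK m q : Nat) : Int))) ((p : Nat) : Int) 0
      = ((pvBK m p : Nat) : Int) := by
  rw [PySem.List.pyGetD_natCast, List.getD_eq_getElem?_getD, List.getElem?_map,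
    List.getElem?_range (by omega)]
  rfl

theorem pv_bl_zero (f : Nat → Int) (m : Nat) :
    PySem.List.pyGetD ((List.range (m + 1)).map f) 0 0 = f 0 := by
  rw [List.range_succ_eq_map, List.map_cons, PySem.List.pyGetD_zero_cons]

theorem pv_bl_last (f : Nat → Int) (m : Nat) :
    PySem.List.pyGetD ((List.range (m + 1)).map f) (-1) 0 = f m := by
  rw [List.range_succ, List.map_append, List.map_singleton,
    PySem.List.pyGetD_neg_one_append_singleton]

-- B's bucket loop computes the popcount-bucket masks
theorem pv_buckets (m : Nat) :
    (List.range m).foldl (fun b w => pvStepB b ((w : Nat) : Int)) [1]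
      = (List.range (m + 1)).map (fun p => ((pvBK m p : Nat) : Int)) := by
  induction m with
  | zero =>
    show [(1 : Int)] = [((pvBK 0 0 : Nat) : Int)]
    norm_num [pvBK, pvBC]
  | succ m ih =>
    rw [List.range_succ, List.foldl_append, ih, List.foldl_cons, List.foldl_nil]
    simp only [pvStepB, PySem.List.len_eq, List.length_map, List.length_range, Int.toNat_natCast]
    rw [pv_bl_zero, pv_bl_last, PySem.List.pyRange_one,
      show ((((m + 1 : Nat) : Int)) - 1).toNat = m by push_cast; omega, List.map_map]
    conv_rhs => rw [List.range_succ_eq_map, List.map_cons, List.map_map,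
      List.range_succ, List.map_append, List.map_singleton]
    rw [List.singleton_append]
    refine List.cons_eq_cons.mpr ⟨by rw [pvBK_succ]; norm_num, ?_⟩
    congr 1
    · apply List.map_congr_left
      intro k hk
      have hk' : k < m := List.mem_range.mp hk
      simp only [Function.comp_apply]
      rw [show (1 : Int) + (k : Int) = ((k + 1 : Nat) : Int) by push_cast; ring,
        show ((k + 1 : Nat) : Int) - 1 = ((k : Nat) : Int) by push_cast; ring,
        pv_getD_bl m (k + 1) (by omega), pv_getD_bl m k (by omega),
        pvBK_succ m (k + 1), if_neg (Nat.succ_ne_zero k), Nat.add_sub_cancel]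
      push_cast
      ring
    · simp only [Function.comp_apply]
      rw [pvBK_succ m (m + 1), pvBK_zero_of_gt m (m + 1) (by omega),
        if_neg (Nat.succ_ne_zero m), Nat.add_sub_cancel]
      push_cast
      simp

-- B's suffix loop accumulates the suffix sums, emitting entries back to front
theorem pv_suffix (m : Nat) (bl : List Int)
    (hbl : bl = (List.range (m + 1)).map (fun q => ((pvBK m q : Nat) : Int))) :
    ∀ j : Nat, j ≤ m → ∀ out0 : List (String × Int),
      (PySem.List.pyRange ((j : Nat) : Int) (-1) (-1)).foldl (pvSufStepB bl (m : Int))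
          (((pvSUF m (j + 1) : Nat) : Int), out0)
        = (((pvSUF m 0 : Nat) : Int), (List.range (j + 1)).map (pvEntry m) ++ out0) := by
  subst hbl
  intro j
  induction j with
  | zero =>
    intro _ out0
    rw [PySem.List.pyRange_neg_one_cons (by norm_num : (-1 : Int) < ((0 : Nat) : Int)),
      show ((0 : Nat) : Int) - 1 = -1 by norm_num,
      PySem.List.pyRange_neg_one_eq_nil (le_refl (-1)), List.foldl_cons, List.foldl_nil]
    simp only [pvSufStepB]
    rw [if_pos (by exact_mod_cast Nat.zero_le m), pv_getD_bl m 0 (Nat.zero_le m)]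
    have hacc : ((pvSUF m (0 + 1) : Nat) : Int) + ((pvBK m 0 : Nat) : Int)
        = ((pvSUF m 0 : Nat) : Int) := by
      rw [pvSUF_step m 0 (Nat.zero_le m)]; push_cast; ring
    rw [hacc]
    simp [pvEntry]
  | succ j ih =>
    intro hj out0
    rw [PySem.List.pyRange_neg_one_cons (by omega : (-1 : Int) < ((j + 1 : Nat) : Int)),
      show ((j + 1 : Nat) : Int) - 1 = ((j : Nat) : Int) by push_cast; ring, List.foldl_cons]
    have hstep : pvSufStepB ((List.range (m + 1)).map (fun q => ((pvBK m q : Nat) : Int))) (m : Int)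
        (((pvSUF m (j + 1 + 1) : Nat) : Int), out0) ((j + 1 : Nat) : Int)
        = (((pvSUF m (j + 1) : Nat) : Int), pvEntry m (j + 1) :: out0) := by
      simp only [pvSufStepB]
      rw [if_pos (by exact_mod_cast hj), pv_getD_bl m (j + 1) hj]
      have hacc : ((pvSUF m (j + 1 + 1) : Nat) : Int) + ((pvBK m (j + 1) : Nat) : Int)
          = ((pvSUF m (j + 1) : Nat) : Int) := by
        rw [pvSUF_step m (j + 1) hj]; push_cast; ring
      rw [hacc]
      simp [pvEntry]
    rw [hstep, ih (by omega) (pvEntry m (j + 1) :: out0)]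
    conv_rhs => rw [List.range_succ, List.map_append, List.map_singleton]
    simp [List.append_assoc]

theorem pv_main (m : Nat) : sample_threshold (m : Int) = sample_threshold_alt (m : Int) := by
  unfold sample_threshold
  simp only [sample_threshold_alt]
  rw [show ((m : Int) + 2) = ((m + 2 : Nat) : Int) by push_cast; ring,
    PySem.List.pyRange_zero_nat, List.foldl_map, PySem.List.foldl_append_singleton_eq_map,
    PySem.List.pyRange_zero_nat m, List.foldl_map, pv_buckets m,
    show ((m : Int) + 1) = ((m + 1 : Nat) : Int) by push_cast; ring,
    PySem.List.pyRange_neg_one_cons (by omega : (-1 : Int) < ((m + 1 : Nat) : Int)),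
    show ((m + 1 : Nat) : Int) - 1 = ((m : Nat) : Int) by push_cast; ring,
    List.foldl_cons]
  have hstep : pvSufStepB ((List.range (m + 1)).map fun q => ((pvBK m q : Nat) : Int)) (m : Int)
      (0, []) ((m + 1 : Nat) : Int) = (((pvSUF m (m + 1) : Nat) : Int), [pvEntry m (m + 1)]) := by
    simp only [pvSufStepB]
    rw [if_neg (by exact_mod_cast (by omega : ¬ ((m + 1 : Nat) : Int) ≤ ((m : Nat) : Int)))]
    simp [pvEntry, pvSUF_top]
  rw [hstep, pv_suffix m _ rfl m (le_refl m) [pvEntry m (m + 1)]]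
  rw [List.nil_append, Int.toNat_natCast,
    show ((1 : Int) <<< m) = ((2 ^ m : Nat) : Int) by
      rw [Int.shiftLeft_eq, one_mul]; push_cast; ring,
    PySem.List.pyRange_zero_nat]
  simp only [List.foldl_map, Int.toNat_natCast]
  simp only [pv_innerA, Int.toNat_natCast, pvTT_eq]
  show _ = List.map (pvEntry m) (List.range (m + 1)) ++ [pvEntry m (m + 1)]
  conv_rhs => rw [show [pvEntry m (m + 1)] = List.map (pvEntry m) [m + 1] from rfl,
    ← List.map_append, ← List.range_succ]
  rfl

theorem pv_neg (n : Int) (h : n ≤ -2) : sample_threshold n = sample_threshold_alt n := by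
  unfold sample_threshold
  simp only [sample_threshold_alt]
  rw [PySem.List.pyRange_one_eq_nil (by omega : n + 2 ≤ 0), List.foldl_nil,
    PySem.List.pyRange_neg_one_eq_nil (by omega : n + 1 ≤ -1), List.foldl_nil]

-- ===== VERDICT (by name: the statement is the Claim_ definition above) =====
theorem sample_threshold_spec : Claim_equal_sample_threshold := by
  intro n _ hpre
  unfold Spec_sample_threshold
  rcases le_or_gt 0 n with h | h
  · have := pv_main n.toNat
    rwa [Int.toNat_of_nonneg h] at this
  · have hn : n ≤ -2 := by
      unfold Pre_sample_threshold at hpre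
      omega
    exact pv_neg n hn
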